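-- pv_equiv track=rewrite | github.com/Jihad011/Mini_Chess_AI_Lab | src/main/utils/move_utils.py | generate_knight_moves
-- ===== SOURCE A (Python) =====
-- def generate_knight_moves(rows=6, cols=5):
--     """Generate a dictionary of precomputed knight moves for each board square."""
--     knight_deltas = [
--         (-2, -1), (-2, +1),
--         (-1, -2), (-1, +2),
--         (+1, -2), (+1, +2),
--         (+2, -1), (+2, +1)
--     ]
--
--     moves_from = {}
--
--     for r in range(rows):
--         for c in range(cols):
--             moves = []
--             for dr, dc in knight_deltas:
--                 nr, nc = r + dr, c + dc
--                 if 0 <= nr < rows and 0 <= nc < cols: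
--                     moves.append((nr, nc))
--             moves_from[(r, c)] = moves
--
--     return moves_from
-- ===== SOURCE B (Python) =====
-- def generate_knight_moves(rows=6, cols=5):
--     """Generate a dictionary of precomputed knight moves for each board square."""
--     moves_from = {}
--     for r in range(rows):
--         for c in range(cols):
--             out = []
--             # scan the five candidate destination rows; the column offset is
--             # determined arithmetically: |dr| + |dc| = 3 for a knight move
--             for nr in range(r - 2, r + 3):
--                 if 0 <= nr < rows:
--                     dr = abs(nr - r)
--                     if dr != 0:
--                         dc = 3 - dr
--                         for nc in (c - dc, c + dc):
--                             if 0 <= nc < cols: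
--                                 out.append((nr, nc))
--             moves_from[(r, c)] = out
--     return moves_from
-- ===== Notes on version B (the rewrite author's own statement) =====
-- stated objective: alternative
-- what changed: B drops the hardcoded 8-delta table: for each square it scans the five candidate destination rows r-2..r+2 and derives the column offset arithmetically (dc = 3 - |dr|), testing the two candidate columns.
import Mathlib
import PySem

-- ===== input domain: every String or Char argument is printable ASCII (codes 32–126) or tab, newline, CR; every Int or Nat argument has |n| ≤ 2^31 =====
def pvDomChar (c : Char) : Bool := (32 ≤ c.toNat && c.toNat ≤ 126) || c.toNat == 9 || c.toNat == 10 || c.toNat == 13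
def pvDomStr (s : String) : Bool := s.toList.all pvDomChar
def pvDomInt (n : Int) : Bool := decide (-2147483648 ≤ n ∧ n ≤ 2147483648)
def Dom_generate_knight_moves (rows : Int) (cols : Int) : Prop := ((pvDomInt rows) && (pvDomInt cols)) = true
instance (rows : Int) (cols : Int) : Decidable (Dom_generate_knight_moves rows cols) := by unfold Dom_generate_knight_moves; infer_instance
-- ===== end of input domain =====

-- B replaces A's hardcoded 8-delta table by a scan of the five candidate rows with the
-- column offset derived arithmetically (dc = 3 - |dr|); same values, alternative algorithm.
-- The dict keyed by (r, c) is represented as the association list in insertion order;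
-- every key is inserted exactly once, so each 'moves_from[(r, c)] = moves' appends a triple.

-- ===== PORT A =====
def knightDeltas : List (Int × Int) :=
  [(-2, -1), (-2, 1), (-1, -2), (-1, 2), (1, -2), (1, 2), (2, -1), (2, 1)]

def genMovesA (rows cols r c : Int) : List (Int × Int) :=
  knightDeltas.foldl (fun moves d =>
    if 0 ≤ r + d.1 ∧ r + d.1 < rows ∧ 0 ≤ c + d.2 ∧ c + d.2 < cols then
      moves ++ [(r + d.1, c + d.2)]
    else moves) []

def generate_knight_moves (rows : Int) (cols : Int) : List (Int × Int × List (Int × Int)) :=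
  (PySem.List.pyRange 0 rows 1).foldl (fun acc r =>
    (PySem.List.pyRange 0 cols 1).foldl (fun acc c =>
      acc ++ [(r, c, genMovesA rows cols r c)]) acc) []

-- ===== PORT B =====
def genMovesB (rows cols r c : Int) : List (Int × Int) :=
  (PySem.List.pyRange (r - 2) (r + 3) 1).foldl (fun out nr =>
    if 0 ≤ nr ∧ nr < rows then
      let dr : Int := |nr - r|
      if dr ≠ 0 then
        let dc : Int := 3 - dr
        [c - dc, c + dc].foldl (fun out nc =>
          if 0 ≤ nc ∧ nc < cols then out ++ [(nr, nc)] else out) out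
      else out
    else out) []

def generate_knight_moves_alt (rows : Int) (cols : Int) : List (Int × Int × List (Int × Int)) :=
  (PySem.List.pyRange 0 rows 1).foldl (fun acc r =>
    (PySem.List.pyRange 0 cols 1).foldl (fun acc c =>
      acc ++ [(r, c, genMovesB rows cols r c)]) acc) []

-- ===== PRECONDITION & SPEC =====
def Spec_generate_knight_moves (rows : Int) (cols : Int) (out : List (Int × Int × List (Int × Int))) : Prop := out = generate_knight_moves_alt rows cols
instance (rows : Int) (cols : Int) (out : List (Int × Int × List (Int × Int))) : Decidable (Spec_generate_knight_moves rows cols out) := by unfold Spec_generate_knight_moves; infer_instance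

-- ===== CLAIM (what is proved, stated in full; the proofs are below) =====
def Claim_equal_generate_knight_moves : Prop := ∀ (rows : Int) (cols : Int), Dom_generate_knight_moves rows cols → Spec_generate_knight_moves rows cols (generate_knight_moves rows cols)

-- ===== LEMMAS AND PROOFS =====

lemma range5 (r : Int) : PySem.List.pyRange (r - 2) (r + 3) 1 = [r - 2, r - 1, r, r + 1, r + 2] := by
  rw [PySem.List.pyRange_one_cons (by omega)]
  rw [PySem.List.pyRange_one_cons (by omega)]
  rw [PySem.List.pyRange_one_cons (by omega)]
  rw [PySem.List.pyRange_one_cons (by omega)]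
  rw [PySem.List.pyRange_one_cons (by omega)]
  rw [PySem.List.pyRange_one_eq_nil (by omega)]
  norm_num
  omega

-- one row of B (two mirrored candidate columns) equals the corresponding pair of A's delta steps
lemma rowpair (rows cols nr c dc : Int) (acc : List (Int × Int)) :
    (if 0 ≤ nr ∧ nr < rows then
       (if 0 ≤ c + dc ∧ c + dc < cols then
          (if 0 ≤ c - dc ∧ c - dc < cols then acc ++ [(nr, c - dc)] else acc) ++ [(nr, c + dc)]
        else (if 0 ≤ c - dc ∧ c - dc < cols then acc ++ [(nr, c - dc)] else acc))
     else acc)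
    = (if 0 ≤ nr ∧ nr < rows ∧ 0 ≤ c + dc ∧ c + dc < cols then
         (if 0 ≤ nr ∧ nr < rows ∧ 0 ≤ c - dc ∧ c - dc < cols then acc ++ [(nr, c - dc)] else acc) ++ [(nr, c + dc)]
       else (if 0 ≤ nr ∧ nr < rows ∧ 0 ≤ c - dc ∧ c - dc < cols then acc ++ [(nr, c - dc)] else acc)) := by
  split_ifs <;> simp_all <;> omega

lemma genMoves_eq (rows cols r c : Int) : genMovesA rows cols r c = genMovesB rows cols r c := by
  have h2 : |r - 2 - r| = (2 : Int) := by rw [show r - 2 - r = (-2 : Int) by ring]; decide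
  have h1 : |r - 1 - r| = (1 : Int) := by rw [show r - 1 - r = (-1 : Int) by ring]; decide
  have h0 : |r - r| = (0 : Int) := by rw [show r - r = (0 : Int) by ring]; decide
  have h1' : |r + 1 - r| = (1 : Int) := by rw [show r + 1 - r = (1 : Int) by ring]; decide
  have h2' : |r + 2 - r| = (2 : Int) := by rw [show r + 2 - r = (2 : Int) by ring]; decide
  have er2 : r + (-2 : Int) = r - 2 := by ring
  have er1 : r + (-1 : Int) = r - 1 := by ring
  have ec2 : c + (-2 : Int) = c - 2 := by ring
  have ec1 : c + (-1 : Int) = c - 1 := by ring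
  simp only [genMovesA, genMovesB, knightDeltas, range5, List.foldl, h0, h1, h2, h1', h2',
    er2, er1, ec2, ec1, ne_eq, Int.reduceSub, Int.reduceEq, not_false_eq_true, if_true, if_false,
    ite_self, not_true_eq_false]
  rw [rowpair, rowpair, rowpair, rowpair]

theorem generate_knight_moves_spec : Claim_equal_generate_knight_moves := by
  intro rows cols _
  unfold Spec_generate_knight_moves generate_knight_moves generate_knight_moves_alt
  simp only [genMoves_eq]
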